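-- pv_equiv track=rewrite | github.com/machoneywell/Python | CS Labs/Lab6.py | isInserted
-- ===== SOURCE A (Python) =====
-- def isInserted(w1, w2):
--
--     # k will stand for the index of the inserted letter; it can have any index
--     # from 0 through len(w2) - 1.
--     k = 0
--     while (k < len(w2)):
--
--         # We split w2 into two substrings at index k.
--
--         # firstString will be w2[0..k-1]
--         # ADD CODE HERE to compute firstString
--         # I used 5 lines of code including a while-loop
--         i = 0
--         firstString = ""
--         while (i <= k - 1):
--             firstString = firstString + w2[i]
--             i = i + 1
--
--
--
--         # secondString will be w2[k+1..len(w2)-1]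
--         # ADD CODE HERE to compute secondString
--         # I used 5 lines of code including a while-loop
--         i = k+1
--         secondString = ""
--         while (i < len(w2)):
--             secondString = secondString + w2[i]
--             i = i + 1
--
--
--         if (w1 == firstString + secondString):
--             return True
--
--         k = k + 1
--
--     return False
-- ===== SOURCE B (Python) =====
-- def isInserted(w1, w2):
--     # O(n): w2 must be exactly one char longer; skip the common prefix,
--     # then the rest of w1 must equal w2 after skipping one char.
--     if len(w2) != len(w1) + 1:
--         return False
--     i = 0
--     while i < len(w1) and w1[i] == w2[i]:
--         i += 1
--     return w1[i:] == w2[i + 1:]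
-- ===== Notes on version B (the rewrite author's own statement) =====
-- stated objective: faster
-- what changed: Replaced A's loop over every deletion index (rebuilding both substrings character by character each time) with a length check plus a single scan that skips the common prefix and compares the suffixes once.
import Mathlib
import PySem

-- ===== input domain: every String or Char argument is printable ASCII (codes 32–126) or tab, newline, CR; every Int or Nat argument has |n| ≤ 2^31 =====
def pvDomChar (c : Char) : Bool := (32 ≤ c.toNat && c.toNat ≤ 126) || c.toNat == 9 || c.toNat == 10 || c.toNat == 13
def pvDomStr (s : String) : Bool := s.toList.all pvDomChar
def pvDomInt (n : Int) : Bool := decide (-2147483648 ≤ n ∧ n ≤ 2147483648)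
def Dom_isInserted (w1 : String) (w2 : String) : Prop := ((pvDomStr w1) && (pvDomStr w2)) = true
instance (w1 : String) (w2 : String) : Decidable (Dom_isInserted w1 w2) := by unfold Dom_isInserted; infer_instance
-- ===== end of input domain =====

-- B replaces A's quadratic try-every-deletion-index loop with a length check and a single
-- first-mismatch scan (objective: faster, asymptotically).


-- ===== PORT A =====
-- inner while: firstString = firstString + w2[i]; i = i + 1  (while i <= k - 1)
def pvLoopFirst (w2 : List Char) (k : Nat) (i : Nat) (acc : List Char) : List Char :=
  if _h : i + 1 ≤ k then pvLoopFirst w2 k (i + 1) (acc ++ [w2.getD i ' ']) else acc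
termination_by k - i

-- inner while: secondString = secondString + w2[i]; i = i + 1  (while i < len(w2))
def pvLoopSecond (w2 : List Char) (i : Nat) (acc : List Char) : List Char :=
  if _h : i < w2.length then pvLoopSecond w2 (i + 1) (acc ++ [w2.getD i ' ']) else acc
termination_by w2.length - i

-- outer while over k
def pvLoopK (w1 w2 : List Char) (k : Nat) : Bool :=
  if _h : k < w2.length then
    let firstString := pvLoopFirst w2 k 0 []
    let secondString := pvLoopSecond w2 (k + 1) []
    if w1 = firstString ++ secondString then true
    else pvLoopK w1 w2 (k + 1)
  else false
termination_by w2.length - k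

def isInserted (w1 : String) (w2 : String) : Bool :=
  pvLoopK w1.toList w2.toList 0

-- ===== PORT B =====
-- skip the common prefix, then compare w1[i:] with w2[i+1:]
def pvSuffScan : List Char → List Char → Bool
  | a :: as, b :: bs => if a = b then pvSuffScan as bs else decide (a :: as = bs)
  | x, y => decide (x = y.drop 1)

def isInserted_alt (w1 : String) (w2 : String) : Bool :=
  if w2.length ≠ w1.length + 1 then false
  else pvSuffScan w1.toList w2.toList

-- ===== PRECONDITION & SPEC =====
def Spec_isInserted (w1 : String) (w2 : String) (out : Bool) : Prop := out = isInserted_alt w1 w2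
instance (w1 : String) (w2 : String) (out : Bool) : Decidable (Spec_isInserted w1 w2 out) := by unfold Spec_isInserted; infer_instance

-- ===== CLAIM (what is proved, stated in full; the proofs are below) =====
def Claim_equal_isInserted : Prop := ∀ (w1 : String) (w2 : String), Dom_isInserted w1 w2 → Spec_isInserted w1 w2 (isInserted w1 w2)

-- ===== LEMMAS AND PROOFS =====

-- the common reference predicate: w1 is w2 with the char at some index j deleted
def DelAt (x y : List Char) : Prop := ∃ j, j < y.length ∧ x = y.take j ++ y.drop (j + 1)

theorem loopFirst_eq (w2 : List Char) (k : Nat) (hk : k ≤ w2.length) :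
    ∀ i acc, i ≤ k → pvLoopFirst w2 k i acc = acc ++ ((w2.drop i).take (k - i)) := by
  intro i
  induction' hn : k - i with n ih generalizing i
  · intro acc hi
    have : i = k := by omega
    subst this
    rw [pvLoopFirst]
    simp
  · intro acc hi
    rw [pvLoopFirst]
    have hik : i + 1 ≤ k := by omega
    simp only [dif_pos hik]
    rw [ih (i+1) (by omega) _ hik]
    have hi' : i < w2.length := by omega
    have hd : List.drop i w2 = w2[i] :: List.drop (i+1) w2 := (List.getElem_cons_drop hi').symm
    rw [List.getD_eq_getElem w2 ' ' hi', show n + 1 = n.succ from rfl, hd, List.take_succ_cons]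
    simp

theorem loopSecond_eq (w2 : List Char) :
    ∀ i acc, pvLoopSecond w2 i acc = acc ++ w2.drop i := by
  intro i
  induction' hn : w2.length - i with n ih generalizing i
  · intro acc
    rw [pvLoopSecond]
    have : ¬ i < w2.length := by omega
    simp [this, List.drop_eq_nil_of_le (by omega : w2.length ≤ i)]
  · intro acc
    have hi : i < w2.length := by omega
    rw [pvLoopSecond]
    simp only [dif_pos hi]
    rw [ih (i+1) (by omega)]
    rw [List.getD_eq_getElem w2 ' ' hi, ← List.getElem_cons_drop hi]
    simp

theorem loopK_iff (w1 w2 : List Char) :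
    ∀ k, pvLoopK w1 w2 k = true ↔ ∃ j, k ≤ j ∧ j < w2.length ∧ w1 = w2.take j ++ w2.drop (j + 1) := by
  intro k
  induction' hn : w2.length - k with n ih generalizing k
  · rw [pvLoopK]
    have : ¬ k < w2.length := by omega
    simp [this]
    intro j h1 h2 _
    omega
  · have hk : k < w2.length := by omega
    rw [pvLoopK]
    simp only [dif_pos hk]
    rw [loopFirst_eq w2 k (by omega) 0 [] (by omega), loopSecond_eq w2 (k+1) []]
    simp only [List.nil_append, List.drop_zero, Nat.sub_zero]
    split_ifs with he
    · simp only [true_iff]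
      exact ⟨k, le_refl k, hk, by simpa using he⟩
    · rw [ih (k+1) (by omega)]
      constructor
      · rintro ⟨j, hj1, hj2, hj3⟩; exact ⟨j, by omega, hj2, hj3⟩
      · rintro ⟨j, hj1, hj2, hj3⟩
        refine ⟨j, ?_, hj2, hj3⟩
        rcases Nat.eq_or_lt_of_le hj1 with h | h
        · exfalso; apply he; subst h; simpa using hj3
        · omega

theorem suffScan_iff (x y : List Char) (hlen : y.length = x.length + 1) :
    pvSuffScan x y = true ↔ DelAt x y := by
  induction x generalizing y with
  | nil =>
    match y, hlen with
    | [c], _ =>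
      simp [pvSuffScan, DelAt]
  | cons a as ih =>
    match y, hlen with
    | b :: bs, hlen =>
      have hlen' : bs.length = as.length + 1 := by simpa using hlen
      by_cases hab : a = b
      · subst hab
        simp only [pvSuffScan, if_true]
        rw [ih bs hlen']
        unfold DelAt
        constructor
        · rintro ⟨j, hj1, hj2⟩
          exact ⟨j + 1, by simpa using hj1, by simp [hj2]⟩
        · rintro ⟨j, hj1, hj2⟩
          match j with
          | 0 =>
            simp at hj2
            exact ⟨0, by simp [hlen'], by simp [← hj2]⟩
          | j + 1 =>
            simp at hj2
            exact ⟨j, by simpa using hj1, hj2⟩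
      · simp only [pvSuffScan, if_neg hab, decide_eq_true_eq]
        unfold DelAt
        constructor
        · intro h; exact ⟨0, by simp, by simp [h]⟩
        · rintro ⟨j, hj1, hj2⟩
          match j with
          | 0 => simpa using hj2
          | j + 1 =>
            simp at hj2
            exact absurd hj2.1 hab

theorem alt_iff (w1 w2 : List Char) :
    (if w2.length ≠ w1.length + 1 then false else pvSuffScan w1 w2) = true ↔ DelAt w1 w2 := by
  split_ifs with h
  · simp only [false_iff]
    rintro ⟨j, hj1, hj2⟩
    apply h
    have := congrArg List.length hj2
    simp at this
    omega
  · exact suffScan_iff w1 w2 (by omega)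

-- ===== VERDICT (by name: the statement is the Claim_ definition above) =====
theorem isInserted_spec : Claim_equal_isInserted := by
  intro w1 w2 _
  unfold Spec_isInserted isInserted isInserted_alt
  rw [← String.length_toList (s := w1), ← String.length_toList (s := w2)]
  rw [Bool.eq_iff_iff, loopK_iff, alt_iff]
  unfold DelAt
  constructor
  · rintro ⟨j, _, hj2, hj3⟩; exact ⟨j, hj2, hj3⟩
  · rintro ⟨j, hj2, hj3⟩; exact ⟨j, Nat.zero_le j, hj2, hj3⟩
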